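-- pv_equiv track=rewrite | github.com/sjmcmahon/Medras-MC | repairanalysis/analyzeAberrations.py | calculateComplexities
-- ===== SOURCE A (Python) =====
-- def calculateComplexities(finalFragments):
-- 	simple = 0
-- 	complexes = 0
-- 	for f in finalFragments:
-- 		junctions = 0
-- 		for n in range(1,len(f)):
-- 			if(f[n-1][0]//2!=f[n][0]//2):
-- 				junctions+=1
--
-- 		if junctions==1:
-- 			simple+=1
-- 		else:
-- 			if junctions>1:
-- 				complexes+=1
--
-- 	return str(simple)+"\t"+str(complexes)
-- ===== SOURCE B (Python) =====
-- def calculateComplexities(finalFragments):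
--     simple = 0
--     complexes = 0
--     for f in finalFragments:
--         keys = [e[0] // 2 for e in f]
--         if not keys:
--             continue
--         a = keys[0]
--         b = keys[-1]
--         p = keys.count(a)
--         if p == len(keys):
--             continue  # uniform fragment: no junctions
--         if a != b and keys == [a] * p + [b] * (len(keys) - p):
--             simple += 1
--         else:
--             complexes += 1
--     return str(simple) + "\t" + str(complexes)
-- ===== Notes on version B (the rewrite author's own statement) =====
-- stated objective: alternative
-- what changed: B classifies each fragment by pattern reconstruction instead of counting adjacent transitions: it takes a=keys[0], b=keys[-1], p=keys.count(a), treats the fragment as uniform when p==len(keys), and calls it simple exactly when the key list literally equals the rebuilt two-block list [a]*p+[b]*(len-p) with a!=b, complex otherwise.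
-- outside the precondition, e.g. on calculateComplexities([[[]]]): A returns '0\t0', B raises IndexError
import Mathlib
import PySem

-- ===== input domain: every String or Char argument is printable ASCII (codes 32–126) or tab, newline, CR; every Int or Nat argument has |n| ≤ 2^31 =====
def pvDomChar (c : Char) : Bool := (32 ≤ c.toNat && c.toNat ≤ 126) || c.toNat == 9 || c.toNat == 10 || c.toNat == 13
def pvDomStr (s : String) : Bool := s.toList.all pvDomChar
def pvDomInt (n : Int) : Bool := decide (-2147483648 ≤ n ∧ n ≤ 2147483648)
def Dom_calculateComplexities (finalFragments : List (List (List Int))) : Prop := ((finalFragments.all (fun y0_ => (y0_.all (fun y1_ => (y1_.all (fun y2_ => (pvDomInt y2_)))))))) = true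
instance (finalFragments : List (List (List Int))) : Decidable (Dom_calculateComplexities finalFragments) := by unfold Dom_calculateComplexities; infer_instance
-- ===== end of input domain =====

-- B classifies each fragment by rebuilding the two-block pattern [head]*count + [last]*(rest) and
-- comparing it to the key list, instead of A's adjacent-junction counter; alternative, not claimed faster.

-- ===== PORT A =====
def calculateComplexities (finalFragments : List (List (List Int))) : String :=
  let sc : Int × Int := finalFragments.foldl (fun (sc : Int × Int) f =>
    let junctions : Int := (PySem.List.pyRange 1 (f.length : Int) 1).foldl
      (fun j n =>
        if PySem.Int.floordiv ((PySem.List.pyGet? ((PySem.List.pyGet? f (n - 1)).getD []) 0).getD 0) 2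
             ≠ PySem.Int.floordiv ((PySem.List.pyGet? ((PySem.List.pyGet? f n).getD []) 0).getD 0) 2
        then j + 1 else j) 0
    if junctions = 1 then (sc.1 + 1, sc.2)
    else if junctions > 1 then (sc.1, sc.2 + 1)
    else sc) (0, 0)
  PySem.Int.toStr sc.1 ++ "\t" ++ PySem.Int.toStr sc.2

-- ===== PORT B =====
def calculateComplexities_alt (finalFragments : List (List (List Int))) : String :=
  let sc : Int × Int := finalFragments.foldl (fun (sc : Int × Int) f =>
    let keys := f.map (fun e => PySem.Int.floordiv ((PySem.List.pyGet? e 0).getD 0) 2)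
    if keys = [] then sc
    else
      let a := (PySem.List.pyGet? keys 0).getD 0
      let b := (PySem.List.pyGet? keys (-1)).getD 0
      let p : Int := (PySem.List.count keys a : Int)
      if p = (keys.length : Int) then sc
      else if a ≠ b ∧ keys = PySem.List.pyRepeat [a] p ++ PySem.List.pyRepeat [b] ((keys.length : Int) - p)
      then (sc.1 + 1, sc.2)
      else (sc.1, sc.2 + 1)) (0, 0)
  PySem.Int.toStr sc.1 ++ "\t" ++ PySem.Int.toStr sc.2

-- ===== PRECONDITION & SPEC =====
-- Pre_ requires every innermost list nonempty: on a fragment of length ≥ 2 with an empty element A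
-- itself raises IndexError, and on a short fragment with an empty element (e.g. [[[]]]) A returns
-- while B's natural key extraction e[0] raises, so those inputs are excluded too (see cites).
def Pre_calculateComplexities (finalFragments : List (List (List Int))) : Prop :=
  ∀ f ∈ finalFragments, ∀ e ∈ f, e ≠ ([] : List Int)
instance (finalFragments : List (List (List Int))) : Decidable (Pre_calculateComplexities finalFragments) := by
  unfold Pre_calculateComplexities; infer_instance
def pvWitness_calculateComplexities : List (List (List Int)) := [[[0], [2]], [[1]]]

def Spec_calculateComplexities (finalFragments : List (List (List Int))) (out : String) : Prop := out = calculateComplexities_alt finalFragments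
instance (finalFragments : List (List (List Int))) (out : String) : Decidable (Spec_calculateComplexities finalFragments out) := by unfold Spec_calculateComplexities; infer_instance

-- ===== CLAIM (what is proved, stated in full; the proofs are below) =====
def Claim_equal_calculateComplexities : Prop := ∀ (finalFragments : List (List (List Int))), Dom_calculateComplexities finalFragments → Pre_calculateComplexities finalFragments → Spec_calculateComplexities finalFragments (calculateComplexities finalFragments)

-- ===== LEMMAS AND PROOFS =====

-- the per-element key
def pvKey (e : List Int) : Int := PySem.Int.floordiv ((PySem.List.pyGet? e 0).getD 0) 2

-- number of adjacent unequal pairs of keys (A's junction count)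
def pvZ (keys : List Int) : Int :=
  ((keys.zip keys.tail).countP (fun ab => ab.1 != ab.2) : Int)

lemma pvZ_nonneg (keys : List Int) : 0 ≤ pvZ keys := by
  unfold pvZ; positivity

lemma pvZ_cons_cons (a b : Int) (t : List Int) :
    pvZ (a :: b :: t) = (if a ≠ b then 1 else 0) + pvZ (b :: t) := by
  unfold pvZ
  simp [List.zip, List.countP_cons]
  by_cases h : a = b
  · simp [h]
  · simp [h]; omega

-- A's inner loop computes pvZ of the key list
lemma junctions_eq_pvZ (f : List (List Int)) :
    (PySem.List.pyRange 1 (f.length : Int) 1).foldl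
      (fun j n =>
        if PySem.Int.floordiv ((PySem.List.pyGet? ((PySem.List.pyGet? f (n - 1)).getD []) 0).getD 0) 2
             ≠ PySem.Int.floordiv ((PySem.List.pyGet? ((PySem.List.pyGet? f n).getD []) 0).getD 0) 2
        then j + 1 else j) 0 = pvZ (f.map pvKey) := by
  have hmap : (PySem.List.pyRange 1 (f.length : Int) 1).map
      (fun n => (PySem.Int.floordiv ((PySem.List.pyGet? ((PySem.List.pyGet? f (n - 1)).getD []) 0).getD 0) 2,
                 PySem.Int.floordiv ((PySem.List.pyGet? ((PySem.List.pyGet? f n).getD []) 0).getD 0) 2))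
      = (f.map pvKey).zip (f.map pvKey).tail := by
    apply List.ext_getElem
    · simp [PySem.List.length_pyRange_one, List.length_zip]
    · intro k h1 h2
      rw [List.getElem_map, PySem.List.getElem_pyRange_one]
      rw [List.getElem_zip]
      have hk : k < f.length - 1 := by
        simpa [PySem.List.length_pyRange_one] using h1
      have h1k : (1 : Int) + k - 1 = (k : Int) := by ring
      rw [h1k]
      have e1 : PySem.List.pyGet? f (k : Int) = f[k]? := PySem.List.pyGet?_natCast f k
      have e2 : PySem.List.pyGet? f ((1 : Int) + k) = f[k+1]? := by
        rw [show ((1:Int) + k) = ((k+1 : Nat) : Int) by push_cast; ring, PySem.List.pyGet?_natCast]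
      rw [e1, e2]
      have hk1 : k < f.length := by omega
      have hk2 : k + 1 < f.length := by omega
      simp [hk1, hk2, List.getElem_map, pvKey, List.getElem_tail]
  rw [PySem.List.foldl_congr_mem _ _
      (fun (j : Int) n =>
        if (PySem.Int.floordiv ((PySem.List.pyGet? ((PySem.List.pyGet? f (n - 1)).getD []) 0).getD 0) 2
             != PySem.Int.floordiv ((PySem.List.pyGet? ((PySem.List.pyGet? f n).getD []) 0).getD 0) 2) = true
        then j + 1 else j) 0
      (by intro acc x _; simp [bne_iff_ne])]
  rw [PySem.List.foldl_count_if]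
  unfold pvZ
  rw [← hmap, List.countP_map, zero_add]
  simp only [Function.comp_def]

-- pvZ = 0 iff all elements equal the head
lemma pvZ_zero_iff (a : Int) (t : List Int) : pvZ (a :: t) = 0 ↔ ∀ x ∈ t, x = a := by
  induction t generalizing a with
  | nil => simp [pvZ]
  | cons b t ih =>
      rw [pvZ_cons_cons]
      have h0 := pvZ_nonneg (b :: t)
      constructor
      · intro h
        by_cases hab : a = b
        · subst hab
          simp at h
          intro x hx
          rcases List.mem_cons.mp hx with rfl | hx
          · rfl
          · exact (ih a).mp (by omega) x hx
        · simp [hab] at h; omega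
      · intro h
        have hab : b = a := h b (by simp)
        subst hab
        have : ∀ x ∈ t, x = b := fun x hx => h x (by simp [hx])
        simp [(ih b).mpr this]

-- two-block lists have exactly one junction
lemma pvZ_two_blocks (a b : Int) (p q : Nat) (hab : a ≠ b) (hp : 0 < p) (hq : 0 < q) :
    pvZ (List.replicate p a ++ List.replicate q b) = 1 := by
  induction p with
  | zero => omega
  | succ p ih =>
      cases Nat.eq_zero_or_pos p with
      | inl h0 =>
          subst h0
          obtain ⟨q', rfl⟩ : ∃ q', q = q' + 1 := ⟨q - 1, by omega⟩
          simp only [List.replicate_succ, List.replicate_zero,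
            List.singleton_append]
          rw [pvZ_cons_cons, if_pos hab]
          have : pvZ (b :: List.replicate q' b) = 0 := by
            rw [pvZ_zero_iff]; intro x hx; exact List.eq_of_mem_replicate hx
          omega
      | inr hpos =>
          obtain ⟨p', rfl⟩ : ∃ p', p = p' + 1 := ⟨p - 1, by omega⟩
          have := ih (by omega)
          simp only [List.replicate_succ, List.cons_append] at this ⊢
          rw [pvZ_cons_cons, if_neg (by simp)]
          omega

-- pvZ = 1 forces the two-block shape
lemma pvZ_one_decomp (keys : List Int) (h : pvZ keys = 1) :
    ∃ a b p q, a ≠ b ∧ 0 < p ∧ 0 < q ∧ keys = List.replicate p a ++ List.replicate q b := by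
  induction keys with
  | nil => simp [pvZ] at h
  | cons a t ih =>
      cases t with
      | nil => simp [pvZ] at h
      | cons b t' =>
          rw [pvZ_cons_cons] at h
          have h0 := pvZ_nonneg (b :: t')
          by_cases hab : a = b
          · subst hab
            simp at h
            obtain ⟨a', b', p, q, hne, hp, hq, heq⟩ := ih h
            have hhead : a = a' := by
              obtain ⟨p', rfl⟩ : ∃ p', p = p' + 1 := ⟨p - 1, by omega⟩
              simpa [List.replicate_succ] using congrArg List.head? heq
            subst hhead
            exact ⟨a, b', p + 1, q, hne, by omega, hq, by
              simp [List.replicate_succ, heq]⟩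
          · have h1 : pvZ (b :: t') = 0 := by simp [hab] at h; omega
            have hall : ∀ x ∈ t', x = b := (pvZ_zero_iff b t').mp h1
            refine ⟨a, b, 1, t'.length + 1, hab, by omega, by omega, ?_⟩
            have hrep : (b :: t') = List.replicate (t'.length + 1) b := by
              rw [List.eq_replicate_iff]
              refine ⟨by simp, ?_⟩
              intro x hx
              rcases List.mem_cons.mp hx with rfl | hx
              · rfl
              · exact hall x hx
            calc a :: b :: t' = a :: List.replicate (t'.length + 1) b := by rw [← hrep]
              _ = List.replicate 1 a ++ List.replicate (t'.length + 1) b := by simp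

-- B's per-fragment branch equals A's junction-based branch, for every key list
lemma branch_eq (keys : List Int) (sc : Int × Int) :
    (if keys = [] then sc
     else
      if (PySem.List.count keys ((PySem.List.pyGet? keys 0).getD 0) : Int) = (keys.length : Int) then sc
      else if (PySem.List.pyGet? keys 0).getD 0 ≠ (PySem.List.pyGet? keys (-1)).getD 0 ∧
              keys = PySem.List.pyRepeat [(PySem.List.pyGet? keys 0).getD 0] (PySem.List.count keys ((PySem.List.pyGet? keys 0).getD 0) : Int)
                     ++ PySem.List.pyRepeat [(PySem.List.pyGet? keys (-1)).getD 0] ((keys.length : Int) - (PySem.List.count keys ((PySem.List.pyGet? keys 0).getD 0) : Int))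
      then (sc.1 + 1, sc.2)
      else (sc.1, sc.2 + 1))
    = (if pvZ keys = 1 then (sc.1 + 1, sc.2)
       else if pvZ keys > 1 then (sc.1, sc.2 + 1)
       else sc) := by
  cases hk : keys with
  | nil => simp [pvZ]
  | cons a0 t =>
      rw [← hk]
      have hne : keys ≠ [] := by simp [hk]
      rw [if_neg hne]
      have ha : (PySem.List.pyGet? keys 0).getD 0 = a0 := by
        simp [hk]
      have hlast : (PySem.List.pyGet? keys (-1)).getD 0 = keys.getLast hne := by
        rw [PySem.List.pyGet?_neg_one, List.getLast?_eq_some_getLast hne]; rfl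
      rw [ha, hlast]
      set b := keys.getLast hne with hb
      by_cases huni : (PySem.List.count keys a0 : Int) = (keys.length : Int)
      · -- uniform: pvZ = 0
        have hcount : List.count a0 keys = keys.length := by
          rw [← PySem.List.count_eq]; exact_mod_cast huni
        have hall : ∀ x ∈ t, x = a0 := by
          have hlen := List.count_eq_length.mp hcount
          intro x hx; exact (hlen x (by simp [hk, hx])).symm
        have hz : pvZ keys = 0 := by rw [hk, pvZ_zero_iff]; exact hall
        rw [if_pos huni, hz]
        norm_num
      · rw [if_neg huni]
        have hz_pos : pvZ keys ≠ 0 := by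
          intro hz
          apply huni
          have hall := (pvZ_zero_iff a0 t).mp (by rw [← hk]; exact hz)
          have hcl : List.count a0 keys = keys.length := by
            apply List.count_eq_length.mpr
            intro x hx
            rcases List.mem_cons.mp (by rw [← hk]; exact hx : x ∈ a0 :: t) with rfl | hx'
            · rfl
            · exact (hall x hx').symm
          rw [PySem.List.count_eq]
          exact_mod_cast hcl
        by_cases htest : a0 ≠ b ∧ keys = PySem.List.pyRepeat [a0] (PySem.List.count keys a0 : Int)
            ++ PySem.List.pyRepeat [b] ((keys.length : Int) - (PySem.List.count keys a0 : Int))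
        · -- test passes → pvZ = 1
          obtain ⟨hab, heq⟩ := htest
          rw [PySem.List.pyRepeat_singleton, PySem.List.pyRepeat_singleton] at heq
          set P := ((PySem.List.count keys a0 : Int)).toNat with hP
          set Q := (((keys.length : Int) - (PySem.List.count keys a0 : Int))).toNat with hQ
          have hPpos : 0 < P := by
            rcases Nat.eq_zero_or_pos P with h0 | h; swap; · exact h
            rw [h0, List.replicate_zero, List.nil_append] at heq
            have hQ0 : Q ≠ 0 := by
              intro hq0; rw [hq0, List.replicate_zero] at heq; rw [hk] at heq; cases heq
            have hhd := congrArg List.head? heq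
            rw [hk, List.head?_replicate, if_neg hQ0] at hhd
            simp only [List.head?_cons] at hhd
            exact absurd (Option.some_inj.mp hhd) hab
          have hQpos : 0 < Q := by
            rcases Nat.eq_zero_or_pos Q with h0 | h; swap; · exact h
            rw [h0, List.replicate_zero, List.append_nil] at heq
            have hlst := congrArg List.getLast? heq
            rw [List.getLast?_eq_some_getLast hne, ← hb, List.getLast?_replicate] at hlst
            rw [if_neg (by omega)] at hlst
            exact absurd (Option.some_inj.mp hlst).symm hab
          have h1 : pvZ keys = 1 := by
            rw [heq]; exact pvZ_two_blocks a0 b P Q hab hPpos hQpos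
          rw [if_pos ⟨hab, by rw [PySem.List.pyRepeat_singleton, PySem.List.pyRepeat_singleton]; exact heq⟩]
          rw [h1]
          norm_num
        · -- test fails → pvZ ≠ 1, hence complex
          rw [if_neg htest]
          have hz1 : pvZ keys ≠ 1 := by
            intro h1
            apply htest
            obtain ⟨a', b', p, q, hne', hp, hq, heq⟩ := pvZ_one_decomp keys h1
            have hhead : a0 = a' := by
              obtain ⟨p', rfl⟩ : ∃ p', p = p' + 1 := ⟨p - 1, by omega⟩
              have hh := congrArg List.head? heq
              rw [hk] at hh
              simpa [List.replicate_succ] using hh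
            have hlast' : b = b' := by
              obtain ⟨q', rfl⟩ : ∃ q', q = q' + 1 := ⟨q - 1, by omega⟩
              have hl := congrArg List.getLast? heq
              rw [List.getLast?_eq_some_getLast hne, ← hb, List.getLast?_append] at hl
              simpa [List.getLast?_replicate] using hl
            subst hhead; subst hlast'
            have hcount : List.count a0 keys = p := by
              rw [heq, List.count_append, List.count_replicate, List.count_replicate]
              simp [Ne.symm hne']
            have hcount' : (PySem.List.count keys a0 : Int) = (p : Int) := by
              rw [PySem.List.count_eq]; exact_mod_cast hcount
            have hlen : keys.length = p + q := by simp [heq]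
            refine ⟨hne', ?_⟩
            rw [PySem.List.pyRepeat_singleton, PySem.List.pyRepeat_singleton, hcount']
            rw [show ((keys.length : Int) - (p : Int)) = (q : Int) by rw [hlen]; push_cast; ring]
            simpa using heq
          have hgt : pvZ keys > 1 := by
            have := pvZ_nonneg keys
            omega
          rw [if_neg hz1, if_pos hgt]

-- ===== VERDICT (by name: the statement is the Claim_ definition above) =====
theorem calculateComplexities_spec : Claim_equal_calculateComplexities := by
  intro ffs _ _
  unfold Spec_calculateComplexities calculateComplexities calculateComplexities_alt
  have h1 : ∀ (sc : Int × Int), ∀ f ∈ ffs,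
      (fun (sc : Int × Int) (f : List (List Int)) =>
        let junctions : Int := (PySem.List.pyRange 1 (f.length : Int) 1).foldl
          (fun j n =>
            if PySem.Int.floordiv ((PySem.List.pyGet? ((PySem.List.pyGet? f (n - 1)).getD []) 0).getD 0) 2
                 ≠ PySem.Int.floordiv ((PySem.List.pyGet? ((PySem.List.pyGet? f n).getD []) 0).getD 0) 2
            then j + 1 else j) 0
        if junctions = 1 then (sc.1 + 1, sc.2)
        else if junctions > 1 then (sc.1, sc.2 + 1)
        else sc) sc f
      =
      (fun (sc : Int × Int) (f : List (List Int)) =>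
        let keys := f.map (fun e => PySem.Int.floordiv ((PySem.List.pyGet? e 0).getD 0) 2)
        if keys = [] then sc
        else
          let a := (PySem.List.pyGet? keys 0).getD 0
          let b := (PySem.List.pyGet? keys (-1)).getD 0
          let p : Int := (PySem.List.count keys a : Int)
          if p = (keys.length : Int) then sc
          else if a ≠ b ∧ keys = PySem.List.pyRepeat [a] p ++ PySem.List.pyRepeat [b] ((keys.length : Int) - p)
          then (sc.1 + 1, sc.2)
          else (sc.1, sc.2 + 1)) sc f := by
    intro sc f _
    show (if _ = 1 then _ else _) = _
    rw [junctions_eq_pvZ]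
    exact (branch_eq (f.map pvKey) sc).symm
  rw [List.foldl_ext _ _ (0, 0) h1]
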